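-- pv_equiv track=rewrite | github.com/ccimrie/DeepDECS | augment_tool/library.py | identifyRewards
-- ===== SOURCE A (Python) =====
-- def identifyRewards(content_list):
--     start=0
--     end=0
--     band=0
--     howMany=[]
--     for i in range(0,len(content_list)):
--         if(content_list[i].startswith('rewards')):
--             howMany.append(i)
--         if(content_list[i].startswith('endrewards')):
--             howMany.append(i)
--
--     rewardsText=content_list[howMany[0]:howMany[(len(howMany)-1)]+1]
--     return rewardsText
-- ===== SOURCE B (Python) =====
-- def identifyRewards(content_list):
--     def _is_boundary(line):
--         return line.startswith('rewards') or line.startswith('endrewards')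
--     n = len(content_list)
--     first = 0
--     while first < n and not _is_boundary(content_list[first]):
--         first += 1
--     if first == n:
--         raise IndexError('list index out of range')
--     last = n - 1
--     while not _is_boundary(content_list[last]):
--         last -= 1
--     return content_list[first:last + 1]
-- ===== Notes on version B (the rewrite author's own statement) =====
-- stated objective: simpler
-- what changed: Instead of collecting every boundary index into a list and then indexing its ends, B finds the first boundary by a forward scan and the last by a backward scan and slices directly; no index list is built.
import Mathlib
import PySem

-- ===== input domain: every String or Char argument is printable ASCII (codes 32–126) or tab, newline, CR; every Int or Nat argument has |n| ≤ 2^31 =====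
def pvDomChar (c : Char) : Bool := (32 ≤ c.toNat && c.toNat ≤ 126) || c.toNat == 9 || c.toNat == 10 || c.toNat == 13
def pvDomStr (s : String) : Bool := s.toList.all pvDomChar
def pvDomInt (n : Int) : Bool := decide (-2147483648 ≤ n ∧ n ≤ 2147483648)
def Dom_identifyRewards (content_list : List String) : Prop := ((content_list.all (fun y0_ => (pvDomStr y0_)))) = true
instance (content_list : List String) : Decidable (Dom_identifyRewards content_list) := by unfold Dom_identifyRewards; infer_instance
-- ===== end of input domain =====

-- B replaces A's collect-all-boundary-indices list with a direct forward scan for the first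
-- boundary and a backward scan for the last: simpler, no intermediate index list.


-- ===== PORT A =====
def identifyRewards (content_list : List String) : List String :=
  let howMany : List Int :=
    (PySem.List.pyRange 0 (content_list.length : Int) 1).foldl (fun acc i =>
      let acc := if PySem.Str.startswith (PySem.List.pyGetD content_list i "") "rewards"
                 then acc ++ [i] else acc
      if PySem.Str.startswith (PySem.List.pyGetD content_list i "") "endrewards"
      then acc ++ [i] else acc) []
  -- howMany[0] and howMany[len(howMany)-1] raise IndexError when howMany is empty: outside Pre_
  match PySem.List.pyGet? howMany 0, PySem.List.pyGet? howMany ((howMany.length : Int) - 1) with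
  | some a, some b => PySem.List.slice content_list (some a) (some (b + 1))
  | _, _ => []

-- ===== PORT B =====
def pvIsBoundary (line : String) : Bool :=
  PySem.Str.startswith line "rewards" || PySem.Str.startswith line "endrewards"

-- B's first while loop: forward scan for the first boundary index
def pvFindFirst : List String → Option Nat
  | [] => none
  | x :: t => if pvIsBoundary x then some 0 else (pvFindFirst t).map (· + 1)

-- B's second while loop: backward scan — later lines are consulted first
def pvFindLast : List String → Option Nat
  | [] => none
  | x :: t =>
    match pvFindLast t with
    | some j => some (j + 1)
    | none => if pvIsBoundary x then some 0 else none

def identifyRewards_alt (content_list : List String) : List String :=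
  match pvFindFirst content_list with
  | none => []  -- here B raises IndexError; outside Pre_
  | some f =>
    match pvFindLast content_list with
    | none => []
    | some l => PySem.List.slice content_list (some (f : Int)) (some ((l : Int) + 1))

-- ===== PRECONDITION & SPEC =====
-- A raises IndexError (howMany[0] on an empty list) when no line starts with
-- 'rewards' or 'endrewards'; B raises IndexError there too. Pre_ excludes exactly those inputs.
def Pre_identifyRewards (content_list : List String) : Prop :=
  content_list.any (fun s =>
    PySem.Str.startswith s "rewards" || PySem.Str.startswith s "endrewards") = true
instance (content_list : List String) : Decidable (Pre_identifyRewards content_list) := by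
  unfold Pre_identifyRewards; infer_instance
def pvWitness_identifyRewards : List String := ["rewards", "r=1;", "endrewards"]

def Spec_identifyRewards (content_list : List String) (out : List String) : Prop := out = identifyRewards_alt content_list
instance (content_list : List String) (out : List String) : Decidable (Spec_identifyRewards content_list out) := by unfold Spec_identifyRewards; infer_instance

-- ===== CLAIM (what is proved, stated in full; the proofs are below) =====
def Claim_equal_identifyRewards : Prop := ∀ (content_list : List String), Dom_identifyRewards content_list → Pre_identifyRewards content_list → Spec_identifyRewards content_list (identifyRewards content_list)

-- ===== LEMMAS AND PROOFS =====

-- Proof-only helper: the list of boundary indices A accumulates, defined structurally.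
def pvF : List String → List Nat
  | [] => []
  | x :: t =>
    (if PySem.Str.startswith x "rewards" then [0] else []) ++
    (if PySem.Str.startswith x "endrewards" then [0] else []) ++
    (pvF t).map (· + 1)

lemma pvFold_eq (xs : List String) (a : Nat) (full : List String) (acc : List Int)
    (h : full.drop a = xs) :
    (PySem.List.pyRange (a : Int) (full.length : Int) 1).foldl (fun acc i =>
      let acc := if PySem.Str.startswith (PySem.List.pyGetD full i "") "rewards"
                 then acc ++ [i] else acc
      if PySem.Str.startswith (PySem.List.pyGetD full i "") "endrewards"
      then acc ++ [i] else acc) acc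
    = acc ++ (pvF xs).map (fun k => ((a + k : Nat) : Int)) := by
  induction xs generalizing a acc with
  | nil =>
    have hlen : full.length ≤ a := by
      by_contra hc
      have := List.drop_eq_nil_iff.mp h
      omega
    rw [PySem.List.pyRange_one_eq_nil (by exact_mod_cast hlen)]
    simp [pvF]
  | cons x t ih =>
    have ha : a < full.length := by
      by_contra hc
      rw [List.drop_eq_nil_iff.mpr (by omega)] at h
      simp at h
    have hx : full[a] = x := by
      have := congrArg List.head? h
      rwa [List.head?_drop, List.head?_cons, List.getElem?_eq_getElem ha,
        Option.some_inj] at this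
    have hget : PySem.List.pyGetD full (a : Int) "" = x := by
      rw [PySem.List.pyGetD_natCast, List.getD_eq_getElem?_getD,
        List.getElem?_eq_getElem ha, hx]; rfl
    have ht : full.drop (a + 1) = t := by
      have h1 := congrArg (List.drop 1) h
      simpa [List.drop_drop, Nat.add_comm] using h1
    rw [PySem.List.pyRange_one_cons (by exact_mod_cast ha), List.foldl_cons]
    have hcast : ((a : Int) + 1) = ((a + 1 : Nat) : Int) := by omega
    rw [hcast, ih (a + 1) _ ht]
    simp only [hget, pvF, List.map_append, List.map_map]
    split_ifs <;> simp <;> (intros; omega)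

lemma pvF_head? (xs : List String) : (pvF xs).head? = pvFindFirst xs := by
  induction xs with
  | nil => rfl
  | cons x t ih =>
    simp only [pvF, pvFindFirst, pvIsBoundary]
    by_cases h1 : PySem.Str.startswith x "rewards"
    · simp at h1
      simp [h1]
    · by_cases h2 : PySem.Str.startswith x "endrewards"
      · simp at h1 h2
        simp [h1, h2]
      · simp at h1 h2
        simp [h1, h2, List.head?_map, ih]

lemma pvF_getLast? (xs : List String) : (pvF xs).getLast? = pvFindLast xs := by
  induction xs with
  | nil => rfl
  | cons x t ih =>
    simp only [pvF, pvFindLast]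
    rw [List.getLast?_append, List.getLast?_append, List.getLast?_map]
    rw [ih]
    cases h : pvFindLast t with
    | some j => simp
    | none =>
      simp only [Option.map_none, Option.none_or, pvIsBoundary]
      split_ifs with h1 h2 <;> simp_all

lemma pvF_ne_nil (xs : List String) (h : xs.any pvIsBoundary = true) : pvF xs ≠ [] := by
  induction xs with
  | nil => simp at h
  | cons x t ih =>
    by_cases h1 : PySem.Str.startswith x "rewards"
    · simp at h1
      simp [pvF, h1]
    · by_cases h2 : PySem.Str.startswith x "endrewards"
      · simp at h1 h2
        simp [pvF, h1, h2]
      · have hany : t.any pvIsBoundary = true := by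
          simp only [List.any_cons, Bool.or_eq_true, pvIsBoundary] at h
          rcases h with (h | h) | h
          · exact absurd h h1
          · exact absurd h h2
          · exact h
        simp at h1 h2
        simp [pvF, h1, h2, ih hany]

lemma pvGet_len_sub_one {α : Type} (xs : List α) (h : xs ≠ []) :
    PySem.List.pyGet? xs ((xs.length : Int) - 1) = xs.getLast? := by
  have hl : 0 < xs.length := List.length_pos_iff.mpr h
  rw [show ((xs.length : Int) - 1) = ((xs.length - 1 : Nat) : Int) by omega]
  rw [PySem.List.pyGet?_natCast, List.getLast?_eq_getElem?]

-- ===== VERDICT (by name: the statement is the Claim_ definition above) =====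
theorem identifyRewards_spec : Claim_equal_identifyRewards := by
  intro cl _dom pre
  unfold Pre_identifyRewards at pre
  unfold Spec_identifyRewards identifyRewards identifyRewards_alt
  have hfold := pvFold_eq cl 0 cl [] (by simp)
  simp only [Nat.cast_zero, Nat.zero_add, List.nil_append] at hfold
  rw [hfold]
  have hne : pvF cl ≠ [] := pvF_ne_nil cl pre
  have hmapne : ((pvF cl).map (fun k => ((k : Nat) : Int))) ≠ [] := by
    simpa using hne
  obtain ⟨f, hf⟩ : ∃ f, pvFindFirst cl = some f := by
    have hs : (pvF cl).head?.isSome := by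
      cases hpv : pvF cl with
      | nil => exact absurd hpv hne
      | cons y ys => simp
    rw [pvF_head?] at hs
    exact Option.isSome_iff_exists.mp hs
  obtain ⟨l, hl⟩ : ∃ l, pvFindLast cl = some l := by
    have hs : (pvF cl).getLast?.isSome := by
      simp [List.getLast?_isSome, hne]
    rw [pvF_getLast?] at hs
    exact Option.isSome_iff_exists.mp hs
  have hget0 : PySem.List.pyGet? ((pvF cl).map (fun k => ((k : Nat) : Int))) 0
      = some ((f : Nat) : Int) := by
    rw [PySem.List.pyGet?_zero, ← List.head?_eq_getElem?, List.head?_map, pvF_head?, hf]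
    rfl
  have hgetl : PySem.List.pyGet? ((pvF cl).map (fun k => ((k : Nat) : Int)))
      ((((pvF cl).map (fun k => ((k : Nat) : Int))).length : Int) - 1)
      = some ((l : Nat) : Int) := by
    rw [pvGet_len_sub_one _ hmapne, List.getLast?_map, pvF_getLast?, hl]
    rfl
  simp only [hget0, hgetl, hf, hl]
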